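-- pv_equiv track=rewrite | github.com/LWJOO/pythonQ | 7.29/수합의최대곱집합.py | solution
-- ===== SOURCE A (Python) =====
-- def solution(n, s):
--     answer = []
--     a = []
--     b = 0
--     for i in range(1, s//2+1):
--         for j in range(s,1,-1):
--             if (i + j) == s:
--                 answer.append([i,j])
--
--     for i in range(len(answer)):
--         a.append(answer[i][0] * answer[i][1])
--
--     for i in range(len(a)):
--         if a[i] > b:
--             b, c = a[i], i
--     if s < 2:
--         return [-1]
--     else:
--         d = answer[c]
--         return d
-- ===== SOURCE B (Python) =====
-- def solution(n, s):
--     # Closed form: the product i*(s-i) is maximized at i = s//2.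
--     if s < 2:
--         return [-1]
--     return [s // 2, s - s // 2]
-- ===== Notes on version B (the rewrite author's own statement) =====
-- stated objective: faster
-- what changed: Replaces A's quadratic double loop enumerating all pairs plus two linear scans with the O(1) closed form [s//2, s-s//2] (the product i*(s-i) is maximized at the middle); Pre_ excludes s = 2, where A raises UnboundLocalError.
import Mathlib
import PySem

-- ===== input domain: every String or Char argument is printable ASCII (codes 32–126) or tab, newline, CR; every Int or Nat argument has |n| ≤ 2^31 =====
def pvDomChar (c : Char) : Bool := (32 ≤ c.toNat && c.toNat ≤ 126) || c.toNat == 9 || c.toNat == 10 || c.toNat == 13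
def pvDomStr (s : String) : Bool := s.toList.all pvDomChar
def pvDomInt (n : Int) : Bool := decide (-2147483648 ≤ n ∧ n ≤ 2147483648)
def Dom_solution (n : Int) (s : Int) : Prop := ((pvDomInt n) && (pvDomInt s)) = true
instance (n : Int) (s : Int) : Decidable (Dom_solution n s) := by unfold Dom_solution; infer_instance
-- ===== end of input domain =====

-- B replaces A's O(s^2) pair enumeration + scans with the O(1) closed form [s//2, s-s//2].

-- ===== PORT A =====
-- literal transliteration of A; the 'none' branch of the final match corresponds to the
-- UnboundLocalError Python raises when c was never assigned (only at s = 2; excluded by Pre_)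
def solution (n : Int) (s : Int) : List Int :=
  let answer : List (List Int) :=
    (PySem.List.pyRange 1 (PySem.Int.floordiv s 2 + 1) 1).foldl
      (fun answer i =>
        (PySem.List.pyRange s 1 (-1)).foldl
          (fun answer j => if i + j = s then answer ++ [[i, j]] else answer) answer) []
  let a : List Int :=
    (PySem.List.pyRange 0 (answer.length : Int) 1).foldl
      (fun a i =>
        a ++ [PySem.List.pyGetD (PySem.List.pyGetD answer i []) 0 0 *
              PySem.List.pyGetD (PySem.List.pyGetD answer i []) 1 0]) []
  let bc : Int × Option Int :=
    (PySem.List.pyRange 0 (a.length : Int) 1).foldl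
      (fun bc i => if PySem.List.pyGetD a i 0 > bc.1 then (PySem.List.pyGetD a i 0, some i) else bc)
      (0, none)
  if s < 2 then [-1]
  else
    match bc.2 with
    | some c => PySem.List.pyGetD answer c []
    | none => []

-- ===== PORT B =====
def solution_alt (n : Int) (s : Int) : List Int :=
  if s < 2 then [-1]
  else [PySem.Int.floordiv s 2, s - PySem.Int.floordiv s 2]

-- ===== PRECONDITION & SPEC =====
-- Pre_ excludes only s = 2, where A raises UnboundLocalError (no pair found, c never bound).
def Pre_solution (n : Int) (s : Int) : Prop := s ≠ 2
instance (n : Int) (s : Int) : Decidable (Pre_solution n s) := by unfold Pre_solution; infer_instance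
def pvWitness_solution : Int × Int := (0, 7)

def Spec_solution (n : Int) (s : Int) (out : List Int) : Prop := out = solution_alt n s
instance (n : Int) (s : Int) (out : List Int) : Decidable (Spec_solution n s out) := by unfold Spec_solution; infer_instance

-- ===== CLAIM (what is proved, stated in full; the proofs are below) =====
def Claim_equal_solution : Prop := ∀ (n : Int) (s : Int), Dom_solution n s → Pre_solution n s → Spec_solution n s (solution n s)

-- ===== LEMMAS AND PROOFS =====

-- filter of a nodup list by equality with a member is the singleton
lemma filter_eq_singleton_of_nodup {α : Type} [DecidableEq α] (l : List α) (x : α)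
    (hn : l.Nodup) (hm : x ∈ l) : l.filter (fun y => decide (y = x)) = [x] := by
  induction l with
  | nil => cases hm
  | cons a t ih =>
    simp only [List.nodup_cons] at hn
    rcases List.mem_cons.mp hm with h | h
    · subst h
      have ht : t.filter (fun y => decide (y = x)) = [] := by
        apply List.filter_eq_nil_iff.mpr
        intro y hy
        simp only [decide_eq_true_eq]
        intro h; exact hn.1 (h ▸ hy)
      simp [ht]
    · have hax : ¬ (a = x) := fun he => hn.1 (he ▸ h)
      simp [hax, ih hn.2 h]

-- inner loop of A: for 1 < s - i ≤ s, appends exactly [[i, s-i]]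
lemma inner_fold (s i : Int) (acc : List (List Int)) (h1 : 1 < s - i) (h2 : s - i ≤ s) :
    (PySem.List.pyRange s 1 (-1)).foldl
      (fun answer j => if i + j = s then answer ++ [[i, j]] else answer) acc
    = acc ++ [[i, s - i]] := by
  rw [PySem.List.foldl_append_ite (fun j => i + j = s) (fun j => [i, j])]
  have hcong : (PySem.List.pyRange s 1 (-1)).filter (fun j => decide (i + j = s))
      = (PySem.List.pyRange s 1 (-1)).filter (fun j => decide (j = s - i)) := by
    apply List.filter_congr
    intro x _
    exact decide_eq_decide.mpr (by omega)
  have hnodup : (PySem.List.pyRange s 1 (-1)).Nodup := by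
    rw [PySem.List.pyRange_neg_one_eq_reverse]
    exact List.nodup_reverse.mpr (PySem.List.nodup_pyRange_one _ _)
  have hmem : s - i ∈ PySem.List.pyRange s 1 (-1) :=
    (PySem.List.mem_pyRange_neg_one).mpr ⟨h1, h2⟩
  rw [hcong, filter_eq_singleton_of_nodup _ _ hnodup hmem]
  rfl

-- the index-max fold selects the last element of a strictly increasing positive list
lemma maxfold_aux (xs : List Int) (st b : Int) (c : Option Int)
    (hp : xs.Pairwise (· < ·)) (hb : ∀ x ∈ xs, b < x) (hne : xs ≠ []) :
    (PySem.List.enumerate xs st).foldl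
      (fun bc p => if p.2 > bc.1 then (p.2, some p.1) else bc) (b, c)
    = (xs.getLastD 0, some (st + (xs.length : Int) - 1)) := by
  induction xs generalizing st b c with
  | nil => exact absurd rfl hne
  | cons x t ih =>
    rw [PySem.List.enumerate_cons]
    simp only [List.foldl_cons]
    have hx : x > b := hb x (List.mem_cons_self ..)
    rw [if_pos hx]
    rcases List.eq_nil_or_concat t with ht | ⟨t', y, hty⟩
    · subst ht
      simp [PySem.List.enumerate_nil]
    · have htne : t ≠ [] := by subst hty; simp
      have hp' : t.Pairwise (· < ·) := (List.pairwise_cons.mp hp).2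
      have hb' : ∀ y ∈ t, x < y := (List.pairwise_cons.mp hp).1
      rw [ih (st + 1) x (some st) hp' hb' htne]
      have hlast : (x :: t).getLastD 0 = t.getLastD 0 := by
        rw [List.getLastD_cons, List.getLastD_eq_getLast?, List.getLastD_eq_getLast?,
          List.getLast?_eq_getLast htne]; rfl
      rw [hlast]
      have : st + 1 + (t.length : Int) - 1 = st + ((x :: t).length : Int) - 1 := by
        simp; omega
      rw [this]

theorem solution_spec_aux (n s : Int) (hs : s ≠ 2) : solution n s = solution_alt n s := by
  by_cases hlt : s < 2
  · have hm : PySem.Int.floordiv s 2 < 1 := by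
      rw [PySem.Int.floordiv_lt_iff_lt_mul (by norm_num)]; omega
    unfold solution solution_alt
    rw [PySem.List.pyRange_one_eq_nil (by omega)]
    simp [hlt]
  · -- s ≥ 3
    have hs3 : 3 ≤ s := by omega
    set m := PySem.Int.floordiv s 2 with hmdef
    have hm1 : 1 ≤ m := by
      rw [hmdef, PySem.Int.le_floordiv_iff_mul_le (by norm_num)]; omega
    have hm2 : m ≤ s - 2 := by
      have : m < s - 1 := by
        rw [hmdef, PySem.Int.floordiv_lt_iff_lt_mul (by norm_num)]; omega
      omega
    have h2m : m * 2 ≤ s := by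
      rw [hmdef, ← PySem.Int.le_floordiv_iff_mul_le (by norm_num)]
    -- Step A: the pair list
    have hans : (PySem.List.pyRange 1 (m + 1) 1).foldl
        (fun answer i =>
          (PySem.List.pyRange s 1 (-1)).foldl
            (fun answer j => if i + j = s then answer ++ [[i, j]] else answer) answer) []
        = (PySem.List.pyRange 1 (m + 1) 1).map (fun i => [i, s - i]) := by
      have hcong : ∀ (acc : List (List Int)) (i : Int), i ∈ PySem.List.pyRange 1 (m + 1) 1 →
          (PySem.List.pyRange s 1 (-1)).foldl
            (fun answer j => if i + j = s then answer ++ [[i, j]] else answer) acc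
          = acc ++ [[i, s - i]] := by
        intro acc i hi
        rw [PySem.List.mem_pyRange_one] at hi
        exact inner_fold s i acc (by omega) (by omega)
      rw [PySem.List.foldl_congr_mem _ _ _ _ hcong, PySem.List.foldl_append_singleton_eq_map]
      simp
    simp only [solution, solution_alt]
    rw [hans]
    rw [PySem.List.foldl_pyRange_zero_pyGetD'
      ((PySem.List.pyRange 1 (m + 1) 1).map (fun i => [i, s - i])) []
      (fun a p => a ++ [PySem.List.pyGetD p 0 0 * PySem.List.pyGetD p 1 0]) []]
    rw [PySem.List.foldl_append_singleton_eq_map]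
    have hA : ([] : List Int) ++
        (List.map (fun p => PySem.List.pyGetD p 0 0 * PySem.List.pyGetD p 1 0)
          (List.map (fun i => [i, s - i]) (PySem.List.pyRange 1 (m + 1) 1)))
        = (PySem.List.pyRange 1 (m + 1) 1).map (fun i => i * (s - i)) := by
      rw [List.nil_append, List.map_map]; rfl
    rw [hA]
    set A : List Int := (PySem.List.pyRange 1 (m + 1) 1).map (fun i => i * (s - i)) with hAdef
    have hp : A.Pairwise (· < ·) := by
      rw [hAdef]
      refine List.pairwise_map.mpr ?_
      refine (PySem.List.pairwise_lt_pyRange_one 1 (m + 1)).imp_of_mem ?_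
      intro i j hi hj hij
      rw [PySem.List.mem_pyRange_one] at hi hj
      nlinarith [mul_pos (by omega : (0:Int) < j - i) (by omega : (0:Int) < s - i - j)]
    have hpos : ∀ x ∈ A, (0:Int) < x := by
      intro x hx
      rw [hAdef, List.mem_map] at hx
      obtain ⟨i, hi, rfl⟩ := hx
      rw [PySem.List.mem_pyRange_one] at hi
      exact mul_pos (by omega) (by omega)
    have hne : A ≠ [] := by
      apply List.ne_nil_of_length_pos
      rw [hAdef, List.length_map, PySem.List.length_pyRange_one]
      omega
    have hbc := maxfold_aux A 0 0 none hp hpos hne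
    rw [PySem.List.enumerate_eq_map_pyRange A 0, List.foldl_map] at hbc
    simp only [PySem.List.len_eq] at hbc
    rw [hbc]
    rw [if_neg hlt, if_neg hlt, ← hmdef]
    simp only []
    have hlen : (0 + ((A.length : Int)) - 1) = (((m - 1).toNat : Int)) := by
      rw [hAdef]
      rw [List.length_map, PySem.List.length_pyRange_one]
      omega
    rw [hlen]
    rw [PySem.List.pyGetD_map_pyRange_one (fun i => [i, s - i]) 1 (m + 1) (m - 1).toNat []
      (by omega)]
    have h1m : (1 + (((m - 1).toNat : Int))) = m := by omega
    rw [h1m]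

-- ===== VERDICT (by name: the statement is the Claim_ definition above) =====
theorem solution_spec : Claim_equal_solution := by
  intro n s _ hp
  unfold Spec_solution
  exact solution_spec_aux n s hp
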